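-- pv_equiv track=rewrite | github.com/anna-atl/object-identification | shingling.py | create_shingled_docs
-- ===== SOURCE A (Python) =====
-- def create_shingles(doc, k):
--     if len(doc) >= k:
--         shingles = [doc[i:i + k] for i in range(len(doc) - k + 1)]
--     else:
--         shingles = [doc + '_' * (k - len(doc))]
--     return shingles
--
-- def create_shingled_docs(docs, shingle_type, shingle_size, shingle_weight, experiment_mode):
--     '''
--     This function creates a list and dict of shingles
--     :param texts:one string column of a df (comp names), which is going to be divided in shingles
--     :param k: shingle size
--     :return: list of all shingles with order
--     dict of shingles, shingle as a key, index of the shingle in the list as a value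
--     '''
--     k = shingle_size
--     all_shingles_docs = {}
--
--     docs_shingled = [[] for i in range(len(docs))]
--
--     for doc_index, doc in enumerate(docs):
--         if shingle_type == 'token':
--             shingles_in_doc = [word for word in doc.split()]
--         elif shingle_type == 'shingle':
--             shingles_in_doc = create_shingles(doc, k)
--         elif shingle_type == 'shingle words':
--             words = [word for word in doc.split()]
--             shingles_in_doc = []
--             for word in words:
--                 shingles_in_word = create_shingles(word, k)
--                 shingles_in_doc.extend(shingles_in_word)
--         docs_shingled[doc_index] = shingles_in_doc #every doc as a list of shingle
--         for shingle_index_in_doc, shingle_in_doc in enumerate(shingles_in_doc):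
--             all_shingles_docs.setdefault(shingle_in_doc, []).append(doc_index) # key - shingle, value - doc index
--
--     #shingle overall index - shingle index through all documents, shingle index/position - shingle position/index in the doc
--     shingles_dict = dict(zip(all_shingles_docs.keys(), range(len(all_shingles_docs))))  # key - shingle, value - shingle overall index
--     all_shingles = dict(zip(range(len(all_shingles_docs)), all_shingles_docs.keys()))  # key - shingle overall index, value - shingle
--     docs_shingled = [[shingles_dict[shingle] for shingle in doc_shingled] for doc_shingled in docs_shingled] #every doc as a list of shingle overall indexes
--     all_shingles_docs_dict = dict(zip(all_shingles.keys(), all_shingles_docs.values())) #key - shingle overall index, value - doc indexes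
--
--     return docs_shingled, all_shingles, all_shingles_docs_dict
-- ===== SOURCE B (Python) =====
-- def _shingles_of(text, k):
--     if len(text) >= k:
--         return [text[i:i + k] for i in range(len(text) - k + 1)]
--     return [text + '_' * (k - len(text))]
--
-- def create_shingled_docs(docs, shingle_type, shingle_size, shingle_weight, experiment_mode):
--     k = shingle_size
--     shingle_to_index = {}
--     index_to_shingle = {}
--     index_to_doclist = {}
--     docs_shingled = []
--     for doc_index, doc in enumerate(docs):
--         if shingle_type == 'token':
--             shingles_in_doc = doc.split()
--         elif shingle_type == 'shingle':
--             shingles_in_doc = _shingles_of(doc, k)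
--         elif shingle_type == 'shingle words':
--             shingles_in_doc = [sh for word in doc.split() for sh in _shingles_of(word, k)]
--         indices = []
--         for sh in shingles_in_doc:
--             idx = shingle_to_index.get(sh)
--             if idx is None:
--                 idx = len(shingle_to_index)
--                 shingle_to_index[sh] = idx
--                 index_to_shingle[idx] = sh
--                 index_to_doclist[idx] = []
--             index_to_doclist[idx].append(doc_index)
--             indices.append(idx)
--         docs_shingled.append(indices)
--     return docs_shingled, index_to_shingle, index_to_doclist
-- ===== Notes on version B (the rewrite author's own statement) =====
-- stated objective: alternative
-- what changed: B builds everything in one pass: a shingle-to-index dictionary assigns sequential ids on first sight, and each document's remapped index list plus the index-to-shingle and index-to-doclist tables are emitted directly during the loop, instead of A's two-phase scheme that first groups doc-indices per shingle in a dict and afterwards derives all three outputs by zip/range passes and a full re-lookup pass over every shingle occurrence.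
import Mathlib
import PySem

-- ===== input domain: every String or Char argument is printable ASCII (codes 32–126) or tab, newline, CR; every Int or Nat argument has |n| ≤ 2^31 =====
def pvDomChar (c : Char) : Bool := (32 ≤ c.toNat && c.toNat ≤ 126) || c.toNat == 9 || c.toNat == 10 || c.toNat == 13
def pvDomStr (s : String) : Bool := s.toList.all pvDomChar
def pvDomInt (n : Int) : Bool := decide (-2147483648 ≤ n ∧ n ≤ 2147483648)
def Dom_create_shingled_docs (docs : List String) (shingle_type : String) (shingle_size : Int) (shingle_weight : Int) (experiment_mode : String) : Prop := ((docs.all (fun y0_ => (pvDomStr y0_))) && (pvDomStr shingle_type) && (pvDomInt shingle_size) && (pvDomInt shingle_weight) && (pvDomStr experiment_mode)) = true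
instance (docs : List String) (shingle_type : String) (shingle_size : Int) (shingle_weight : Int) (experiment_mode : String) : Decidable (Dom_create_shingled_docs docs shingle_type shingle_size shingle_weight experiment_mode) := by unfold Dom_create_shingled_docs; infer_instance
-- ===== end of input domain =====

-- B re-implements A's two-phase shingle indexing as a single pass that assigns sequential ids on first
-- sight; equal return values on Pre_ (objective: alternative, same asymptotic cost).

-- ===== PORT A =====
-- Python's '_' * n is ported as String.mk (PySem.List.pyRepeat ['_'] n): string repetition is
-- repetition of its character list (n ≤ 0 gives the empty string), exact.
def create_shingles (doc : String) (k : Int) : List String :=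
  if PySem.Str.len doc ≥ k then
    (PySem.List.pyRange 0 (PySem.Str.len doc - k + 1)).map
      (fun i => PySem.Str.slice doc (some i) (some (i + k)))
  else
    [doc ++ String.mk (PySem.List.pyRepeat ['_'] (k - PySem.Str.len doc))]

-- the if/elif chain computing shingles_in_doc (no else: Python raises UnboundLocalError on an
-- unrecognized shingle_type — excluded by Pre_; the port returns [] there, nothing is claimed there)
def aShingles (shingle_type : String) (k : Int) (doc : String) : List String :=
  if shingle_type == "token" then PySem.Str.split₀ doc
  else if shingle_type == "shingle" then create_shingles doc k
  else if shingle_type == "shingle words" then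
    (PySem.Str.split₀ doc).foldl (fun acc word => acc ++ create_shingles word k) []
  else []

-- one iteration of A's 'for doc_index, doc in enumerate(docs)' loop; p = (doc_index, doc).
-- 'all_shingles_docs.setdefault(sh, []).append(doc_index)' is 'd[sh] = d.get(sh, []) + [doc_index]',
-- i.e. Dict.modify; the docs_shingled pre-allocation + assignment at doc_index builds st.1 in order.
def aDoc (shingle_type : String) (k : Int)
    (st : List (List String) × PySem.Dict String (List Int)) (p : Int × String) :
    List (List String) × PySem.Dict String (List Int) :=
  (st.1 ++ [aShingles shingle_type k p.2],
   (PySem.List.enumerate (aShingles shingle_type k p.2)).foldl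
     (fun d q => d.modify q.2 [] (fun ds => ds ++ [p.1])) st.2)

def create_shingled_docs (docs : List String) (shingle_type : String) (shingle_size : Int)
    (shingle_weight : Int) (experiment_mode : String) :
    List (List Int) × (List (Int × String)) × (List (Int × List Int)) :=
  let k := shingle_size
  let st := (PySem.List.enumerate docs).foldl (aDoc shingle_type k) ([], PySem.Dict.empty)
  let all_shingles_docs := st.2
  let n : Int := (all_shingles_docs.size : Int)
  let shingles_dict := PySem.Dict.ofList (all_shingles_docs.keys.zip (PySem.List.pyRange 0 n))
  let all_shingles : List (Int × String) := (PySem.List.pyRange 0 n).zip all_shingles_docs.keys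
  -- shingles_dict[shingle] never raises (every shingle of st.1 is a key); ported as get?/getD 0
  let docs_shingled := st.1.map (fun ds => ds.map (fun sh => (shingles_dict.get? sh).getD 0))
  let all_shingles_docs_dict := (all_shingles.map (fun q => q.1)).zip all_shingles_docs.values
  (docs_shingled, all_shingles, all_shingles_docs_dict)

-- ===== PORT B =====
def shingles_of (text : String) (k : Int) : List String :=
  if PySem.Str.len text ≥ k then
    (PySem.List.pyRange 0 (PySem.Str.len text - k + 1)).map
      (fun i => PySem.Str.slice text (some i) (some (i + k)))
  else
    [text ++ String.mk (PySem.List.pyRepeat ['_'] (k - PySem.Str.len text))]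

-- B's shingles_in_doc chain (same missing-else behaviour as A, excluded by Pre_)
def bShingles (shingle_type : String) (k : Int) (doc : String) : List String :=
  if shingle_type == "token" then PySem.Str.split₀ doc
  else if shingle_type == "shingle" then shingles_of doc k
  else if shingle_type == "shingle words" then
    (PySem.Str.split₀ doc).flatMap (fun word => shingles_of word k)
  else []

-- body of B's inner 'for sh in shingles_in_doc' loop, i = current doc_index;
-- state q = (indices, shingle_to_index, index_to_shingle, index_to_doclist)
def bStep (i : Int)
    (q : List Int × PySem.Dict String Int × PySem.Dict Int String × PySem.Dict Int (List Int))
    (sh : String) :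
    List Int × PySem.Dict String Int × PySem.Dict Int String × PySem.Dict Int (List Int) :=
  match q.2.1.get? sh with
  | some idx => (q.1 ++ [idx], q.2.1, q.2.2.1, q.2.2.2.modify idx [] (fun ds => ds ++ [i]))
  | none =>
      let idx : Int := (q.2.1.size : Int)
      (q.1 ++ [idx], q.2.1.insert sh idx, q.2.2.1.insert idx sh,
       (q.2.2.2.insert idx []).modify idx [] (fun ds => ds ++ [i]))

-- one iteration of B's outer loop; p = (doc_index, doc)
def bDoc (shingle_type : String) (k : Int)
    (st : List (List Int) × PySem.Dict String Int × PySem.Dict Int String × PySem.Dict Int (List Int))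
    (p : Int × String) :
    List (List Int) × PySem.Dict String Int × PySem.Dict Int String × PySem.Dict Int (List Int) :=
  let inner := (bShingles shingle_type k p.2).foldl (bStep p.1) ([], st.2.1, st.2.2.1, st.2.2.2)
  (st.1 ++ [inner.1], inner.2.1, inner.2.2.1, inner.2.2.2)

def create_shingled_docs_alt (docs : List String) (shingle_type : String) (shingle_size : Int)
    (shingle_weight : Int) (experiment_mode : String) :
    List (List Int) × (List (Int × String)) × (List (Int × List Int)) :=
  let k := shingle_size
  let st := (PySem.List.enumerate docs).foldl (bDoc shingle_type k)
    ([], PySem.Dict.empty, PySem.Dict.empty, PySem.Dict.empty)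
  (st.1, st.2.2.1.items, st.2.2.2.items)

-- ===== PRECONDITION & SPEC =====
-- Pre_ excludes exactly the inputs where Python A raises: an unrecognized shingle_type together with a
-- nonempty docs list leaves shingles_in_doc unbound (UnboundLocalError); Python B raises there as well.
def Pre_create_shingled_docs (docs : List String) (shingle_type : String) (shingle_size : Int) (shingle_weight : Int) (experiment_mode : String) : Prop :=
  shingle_type = "token" ∨ shingle_type = "shingle" ∨ shingle_type = "shingle words" ∨ docs = []
instance (docs : List String) (shingle_type : String) (shingle_size : Int) (shingle_weight : Int) (experiment_mode : String) : Decidable (Pre_create_shingled_docs docs shingle_type shingle_size shingle_weight experiment_mode) := by unfold Pre_create_shingled_docs; infer_instance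

def pvWitness_create_shingled_docs : List String × String × Int × Int × String :=
  (["ab b", "b a"], "token", 2, 1, "run")

def Spec_create_shingled_docs (docs : List String) (shingle_type : String) (shingle_size : Int) (shingle_weight : Int) (experiment_mode : String) (out : List (List Int) × (List (Int × String)) × (List (Int × List Int))) : Prop := out = create_shingled_docs_alt docs shingle_type shingle_size shingle_weight experiment_mode
instance (docs : List String) (shingle_type : String) (shingle_size : Int) (shingle_weight : Int) (experiment_mode : String) (out : List (List Int) × (List (Int × String)) × (List (Int × List Int))) : Decidable (Spec_create_shingled_docs docs shingle_type shingle_size shingle_weight experiment_mode out) := by unfold Spec_create_shingled_docs; infer_instance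

-- ===== CLAIM (what is proved, stated in full; the proofs are below) =====
def Claim_equal_create_shingled_docs : Prop := ∀ (docs : List String) (shingle_type : String) (shingle_size : Int) (shingle_weight : Int) (experiment_mode : String), Dom_create_shingled_docs docs shingle_type shingle_size shingle_weight experiment_mode → Pre_create_shingled_docs docs shingle_type shingle_size shingle_weight experiment_mode → Spec_create_shingled_docs docs shingle_type shingle_size shingle_weight experiment_mode (create_shingled_docs docs shingle_type shingle_size shingle_weight experiment_mode)

-- ===== LEMMAS AND PROOFS =====

-- pure model of A's dict accumulation: one occurrence of shingle sh in document i,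
-- mirroring PySem.Dict.modify at the items-list level
def stepAI (i : Int) (its : List (String × List Int)) (sh : String) : List (String × List Int) :=
  let v := (((its.find? (fun p => p.1 == sh)).map (fun p => p.2)).getD []) ++ [i]
  if its.any (fun p => p.1 == sh) then its.map (fun p => if p.1 == sh then (sh, v) else p)
  else its ++ [(sh, v)]

def dacc (i : Int) (its : List (String × List Int)) (shs : List String) : List (String × List Int) :=
  shs.foldl (stepAI i) its

def dAll (its : List (String × List Int)) (l : List (Int × List String)) : List (String × List Int) :=
  l.foldl (fun t p => dacc p.1 t p.2) its

def ksOf (its : List (String × List Int)) : List String := its.map (fun p => p.1)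
def vsOf (its : List (String × List Int)) : List (List Int) := its.map (fun p => p.2)

def posN : List String → String → Nat
  | [], _ => 0
  | key :: t, sh => if key == sh then 0 else posN t sh + 1

def posI (ks : List String) (sh : String) : Int := (posN ks sh : Int)

def rngF (s n : Nat) : List Int := (List.range n).map (fun j => ((s + j : Nat) : Int))

def s2iOf (its : List (String × List Int)) : PySem.Dict String Int :=
  ⟨(ksOf its).zip (rngF 0 its.length)⟩
def i2sOf (its : List (String × List Int)) : PySem.Dict Int String :=
  ⟨(rngF 0 its.length).zip (ksOf its)⟩
def i2dOf (its : List (String × List Int)) : PySem.Dict Int (List Int) :=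
  ⟨(rngF 0 its.length).zip (vsOf its)⟩

def idxs (i : Int) : List (String × List Int) → List String → List Int
  | _, [] => []
  | its, sh :: rest => posI (ksOf (stepAI i its sh)) sh :: idxs i (stepAI i its sh) rest

def outs : List (String × List Int) → List (Int × List String) → List (List Int)
  | _, [] => []
  | its, p :: l => idxs p.1 its p.2 :: outs (dacc p.1 its p.2) l

lemma modify_mk (its : List (String × List Int)) (sh : String) (i : Int) :
    (PySem.Dict.mk its).modify sh [] (fun ds => ds ++ [i]) = ⟨stepAI i its sh⟩ := by
  unfold stepAI
  simp only [PySem.Dict.modify, PySem.Dict.insert, PySem.Dict.getD, PySem.Dict.get?,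
    PySem.Dict.contains, PySem.Dict.items]
  split <;> rfl

lemma any_fst_iff (its : List (String × List Int)) (sh : String) :
    (its.any (fun p => p.1 == sh) = true) ↔ sh ∈ ksOf its := by
  rw [List.any_eq_true]
  constructor
  · rintro ⟨p, hp, hb⟩
    have h1 : p.1 ∈ ksOf its := List.mem_map_of_mem hp
    exact (eq_of_beq hb) ▸ h1
  · intro hm
    rcases List.mem_map.mp hm with ⟨p, hp, he⟩
    exact ⟨p, hp, by simp [he]⟩

lemma find?_fst (its : List (String × List Int)) (sh : String) :
    its.find? (fun p => p.1 == sh) = its[posN (ksOf its) sh]? := by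
  induction its with
  | nil => simp [posN]
  | cons p t ih =>
      by_cases h : p.1 = sh
      · simp [ksOf, posN, h]
      · have hb : (p.1 == sh) = false := by simpa using h
        simp [ksOf, posN, hb, ih]

lemma posN_lt {ks : List String} {sh : String} (h : sh ∈ ks) : posN ks sh < ks.length := by
  induction ks with
  | nil => cases h
  | cons k t ih =>
      by_cases hk : k = sh
      · simp [posN, hk]
      · have hb : (k == sh) = false := by simpa using hk
        have hm : sh ∈ t := by
          rcases List.mem_cons.mp h with h1 | h1
          · exact absurd h1.symm hk
          · exact h1
        simpa [posN, hb] using ih hm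

lemma getElem?_posN {ks : List String} {sh : String} (h : sh ∈ ks) :
    ks[posN ks sh]? = some sh := by
  induction ks with
  | nil => cases h
  | cons k t ih =>
      by_cases hk : k = sh
      · simp [posN, hk]
      · have hb : (k == sh) = false := by simpa using hk
        have hm : sh ∈ t := by
          rcases List.mem_cons.mp h with h1 | h1
          · exact absurd h1.symm hk
          · exact h1
        simpa [posN, hb] using ih hm

lemma posN_append_of_mem {ks : List String} {sh : String} (ext : List String) (h : sh ∈ ks) :
    posN (ks ++ ext) sh = posN ks sh := by
  induction ks with
  | nil => cases h
  | cons k t ih =>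
      by_cases hk : k = sh
      · simp [posN, hk]
      · have hb : (k == sh) = false := by simpa using hk
        have hm : sh ∈ t := by
          rcases List.mem_cons.mp h with h1 | h1
          · exact absurd h1.symm hk
          · exact h1
        simp [posN, hb, ih hm]

lemma posN_not_mem {ks : List String} {sh : String} (h : sh ∉ ks) : posN ks sh = ks.length := by
  induction ks with
  | nil => rfl
  | cons k t ih =>
      have hk : k ≠ sh := fun e => h (by simp [e])
      have hb : (k == sh) = false := by simpa using hk
      have ht : sh ∉ t := fun e => h (List.mem_cons_of_mem _ e)
      simp [posN, hb, ih ht]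

lemma posN_append_self {ks : List String} {sh : String} (h : sh ∉ ks) :
    posN (ks ++ [sh]) sh = ks.length := by
  induction ks with
  | nil => simp [posN]
  | cons k t ih =>
      have hk : k ≠ sh := fun e => h (by simp [e])
      have hb : (k == sh) = false := by simpa using hk
      have ht : sh ∉ t := fun e => h (List.mem_cons_of_mem _ e)
      simp [posN, hb, ih ht]

lemma posN_getElem {ks : List String} {sh : String} (hnd : ks.Nodup) {j : Nat}
    (hj : j < ks.length) (h : ks[j] = sh) : j = posN ks sh := by
  induction ks generalizing j with
  | nil => simp at hj
  | cons k t ih =>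
      cases j with
      | zero =>
          simp at h
          simp [posN, h]
      | succ j' =>
          have hj' : j' < t.length := by simpa using hj
          have hmem : sh ∈ t := by
            subst h; exact List.getElem_mem _
          have hk : k ≠ sh := by
            intro e
            have : k ∉ t := (List.nodup_cons.mp hnd).1
            exact this (by rw [e]; exact hmem)
          have hb : (k == sh) = false := by simpa using hk
          have := ih (List.nodup_cons.mp hnd).2 hj' (by simpa using h)
          simp [posN, hb, ← this]

lemma rngF_succ (s n : Nat) : rngF s (n + 1) = ((s : Nat) : Int) :: rngF (s + 1) n := by
  unfold rngF
  rw [List.range_succ_eq_map, List.map_cons, List.map_map]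
  simp only [Nat.add_zero]
  refine congrArg (List.cons _) ?_
  apply List.map_congr_left
  intro j _
  show ((s + (j + 1) : Nat) : Int) = (((s + 1) + j : Nat) : Int)
  congr 1
  omega

lemma rngF_snoc (s n : Nat) : rngF s (n + 1) = rngF s n ++ [((s + n : Nat) : Int)] := by
  unfold rngF
  rw [List.range_succ, List.map_append]
  rfl

lemma length_rngF (s n : Nat) : (rngF s n).length = n := by simp [rngF]

lemma mem_rngF {s n : Nat} {x : Int} : x ∈ rngF s n ↔ ∃ j : Nat, j < n ∧ x = ((s + j : Nat) : Int) := by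
  simp [rngF, eq_comm]

lemma find?_zip (ks : List String) : ∀ (s : Nat) (sh : String),
    List.find? (fun p => p.1 == sh) (ks.zip (rngF s ks.length)) =
      if sh ∈ ks then some (sh, ((s + posN ks sh : Nat) : Int)) else none := by
  induction ks with
  | nil => intro s sh; simp
  | cons k t ih =>
      intro s sh
      rw [show (k :: t).length = t.length + 1 from rfl, rngF_succ, List.zip_cons_cons]
      by_cases h : k = sh
      · subst h
        simp [List.find?_cons, posN]
      · have hb : (k == sh) = false := by simpa using h
        rw [List.find?_cons]
        simp only [hb]
        rw [ih (s + 1) sh]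
        by_cases hm : sh ∈ t
        · have hmc : sh ∈ k :: t := List.mem_cons_of_mem _ hm
          simp only [if_pos hm, if_pos hmc]
          have harith : (s + 1) + posN t sh = s + posN (k :: t) sh := by
            simp [posN, hb]; omega
          rw [harith]
        · have hmc : sh ∉ k :: t := by
            intro hc
            rcases List.mem_cons.mp hc with h1 | h1
            · exact h h1.symm
            · exact hm h1
          simp [hm, hmc]

lemma get?_s2iOf (its : List (String × List Int)) (sh : String) :
    (s2iOf its).get? sh = if sh ∈ ksOf its then some (posI (ksOf its) sh) else none := by
  have hlen : its.length = (ksOf its).length := by simp [ksOf]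
  rw [show (s2iOf its).get? sh =
      (((ksOf its).zip (rngF 0 its.length)).find? (fun p => p.1 == sh)).map (fun p => p.2) from rfl]
  rw [hlen, find?_zip]
  by_cases hm : sh ∈ ksOf its <;> simp [hm, posI]

lemma find?_zip_int {ν : Type} (vs : List ν) : ∀ (s j : Nat),
    List.find? (fun p => p.1 == ((s + j : Nat) : Int)) ((rngF s vs.length).zip vs) =
      vs[j]?.map (fun v => (((s + j : Nat) : Int), v)) := by
  induction vs with
  | nil => intro s j; simp
  | cons v t ih =>
      intro s j
      rw [show (v :: t).length = t.length + 1 from rfl, rngF_succ, List.zip_cons_cons]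
      cases j with
      | zero => simp
      | succ j' =>
          have hne : ((s : Int) == ((s + (j' + 1) : Nat) : Int)) = false := by
            simp; omega
          rw [List.find?_cons]
          simp only [hne]
          have hkey : ((s + (j' + 1) : Nat) : Int) = (((s + 1) + j' : Nat) : Int) := by
            congr 1; omega
          rw [hkey, ih (s + 1) j']
          simp

lemma find?_append_none {α : Type} {p : α → Bool} {l l' : List α} (h : l.find? p = none) :
    (l ++ l').find? p = l'.find? p := by
  induction l with
  | nil => simp
  | cons x t ih =>
      rw [List.cons_append]
      cases hx : p x with
      | true =>
          rw [List.find?_cons_of_pos hx] at h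
          exact absurd h (by simp)
      | false =>
          rw [List.find?_cons_of_neg (by simp [hx])] at h
          rw [List.find?_cons_of_neg (by simp [hx])]
          exact ih h

-- case analysis on stepAI
lemma stepAI_mem {its : List (String × List Int)} {sh : String} (i : Int) (hm : sh ∈ ksOf its) :
    stepAI i its sh =
      its.map (fun p => if p.1 == sh then (sh, ((vsOf its)[posN (ksOf its) sh]?.getD []) ++ [i]) else p) := by
  unfold stepAI
  rw [if_pos ((any_fst_iff its sh).mpr hm), find?_fst]
  have hp : posN (ksOf its) sh < its.length := by
    have := posN_lt hm; simpa [ksOf] using this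
  simp [vsOf, List.getElem?_eq_getElem hp]

lemma stepAI_not_mem {its : List (String × List Int)} {sh : String} (i : Int) (hm : sh ∉ ksOf its) :
    stepAI i its sh = its ++ [(sh, [i])] := by
  unfold stepAI
  have hb : (its.any (fun p => p.1 == sh)) = false := by
    cases hx : its.any (fun p => p.1 == sh) with
    | false => rfl
    | true => exact absurd ((any_fst_iff its sh).mp hx) hm
  have hf : its.find? (fun p => p.1 == sh) = none := by
    rw [find?_fst, posN_not_mem (by simpa [ksOf] using hm)]
    simp [ksOf]
  simp [hb, hf]

lemma ks_stepAI_mem {its : List (String × List Int)} {sh : String} (i : Int) (hm : sh ∈ ksOf its) :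
    ksOf (stepAI i its sh) = ksOf its := by
  rw [stepAI_mem i hm]
  unfold ksOf
  rw [List.map_map]
  apply List.map_congr_left
  intro p _
  by_cases h : p.1 = sh
  · simp [Function.comp, h]
  · have hb : (p.1 == sh) = false := by simpa using h
    simp [Function.comp, hb]

lemma len_stepAI_mem {its : List (String × List Int)} {sh : String} (i : Int) (hm : sh ∈ ksOf its) :
    (stepAI i its sh).length = its.length := by
  rw [stepAI_mem i hm]; simp

lemma ks_stepAI_not_mem {its : List (String × List Int)} {sh : String} (i : Int) (hm : sh ∉ ksOf its) :
    ksOf (stepAI i its sh) = ksOf its ++ [sh] := by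
  rw [stepAI_not_mem i hm]; simp [ksOf]

lemma nodup_stepAI {its : List (String × List Int)} {sh : String} (i : Int)
    (h : (ksOf its).Nodup) : (ksOf (stepAI i its sh)).Nodup := by
  by_cases hm : sh ∈ ksOf its
  · rwa [ks_stepAI_mem i hm]
  · rw [ks_stepAI_not_mem i hm]
    rw [List.nodup_append]
    refine ⟨h, List.nodup_singleton _, ?_⟩
    intro a ha b hbmem
    rw [List.mem_singleton] at hbmem
    intro he
    exact hm ((he.trans hbmem) ▸ ha)

lemma mem_stepAI_self (its : List (String × List Int)) (sh : String) (i : Int) :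
    sh ∈ ksOf (stepAI i its sh) := by
  by_cases hm : sh ∈ ksOf its
  · rwa [ks_stepAI_mem i hm]
  · rw [ks_stepAI_not_mem i hm]; simp

lemma ks_dacc_ext (shs : List String) : ∀ (its : List (String × List Int)) (i : Int),
    ∃ e, ksOf (dacc i its shs) = ksOf its ++ e := by
  induction shs with
  | nil => intro its i; exact ⟨[], by simp [dacc]⟩
  | cons sh rest ih =>
      intro its i
      have hstep : dacc i its (sh :: rest) = dacc i (stepAI i its sh) rest := rfl
      rcases ih (stepAI i its sh) i with ⟨e, he⟩
      by_cases hm : sh ∈ ksOf its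
      · exact ⟨e, by rw [hstep, he, ks_stepAI_mem i hm]⟩
      · exact ⟨[sh] ++ e, by rw [hstep, he, ks_stepAI_not_mem i hm, List.append_assoc]⟩

lemma ks_dAll_ext (l : List (Int × List String)) : ∀ (its : List (String × List Int)),
    ∃ e, ksOf (dAll its l) = ksOf its ++ e := by
  induction l with
  | nil => intro its; exact ⟨[], by simp [dAll]⟩
  | cons p rest ih =>
      intro its
      have hstep : dAll its (p :: rest) = dAll (dacc p.1 its p.2) rest := rfl
      rcases ih (dacc p.1 its p.2) with ⟨e, he⟩
      rcases ks_dacc_ext p.2 its p.1 with ⟨e', he'⟩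
      exact ⟨e' ++ e, by rw [hstep, he, he', List.append_assoc]⟩

lemma nodup_dacc (shs : List String) : ∀ (its : List (String × List Int)) (i : Int),
    (ksOf its).Nodup → (ksOf (dacc i its shs)).Nodup := by
  induction shs with
  | nil => intro its i h; simpa [dacc] using h
  | cons sh rest ih =>
      intro its i h
      exact ih (stepAI i its sh) i (nodup_stepAI i h)

lemma nodup_dAll (l : List (Int × List String)) : ∀ (its : List (String × List Int)),
    (ksOf its).Nodup → (ksOf (dAll its l)).Nodup := by
  induction l with
  | nil => intro its h; simpa [dAll] using h
  | cons p rest ih =>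
      intro its h
      exact ih (dacc p.1 its p.2) (nodup_dacc p.2 its p.1 h)

lemma mem_ks_dacc {sh : String} (shs : List String) : ∀ (its : List (String × List Int)) (i : Int),
    sh ∈ shs → sh ∈ ksOf (dacc i its shs) := by
  induction shs with
  | nil => intro its i h; cases h
  | cons x rest ih =>
      intro its i h
      rcases List.mem_cons.mp h with h1 | h1
      · subst h1
        rcases ks_dacc_ext rest (stepAI i its sh) i with ⟨e, he⟩
        have hmem : sh ∈ ksOf (stepAI i its sh) := mem_stepAI_self its sh i
        show sh ∈ ksOf (dacc i (stepAI i its sh) rest)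
        rw [he]
        exact List.mem_append_left _ hmem
      · exact ih (stepAI i its x) i h1

lemma mem_ks_dAll {sh : String} (l : List (Int × List String)) :
    ∀ (its : List (String × List Int)) (p : Int × List String),
    p ∈ l → sh ∈ p.2 → sh ∈ ksOf (dAll its l) := by
  induction l with
  | nil => intro its p h; cases h
  | cons q rest ih =>
      intro its p hp hsh
      rcases List.mem_cons.mp hp with h1 | h1
      · subst h1
        rcases ks_dAll_ext rest (dacc p.1 its p.2) with ⟨e, he⟩
        show sh ∈ ksOf (dAll (dacc p.1 its p.2) rest)
        rw [he]
        exact List.mem_append_left _ (mem_ks_dacc p.2 its p.1 hsh)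
      · exact ih (dacc q.1 its q.2) p h1 hsh

lemma posI_ext {ks : List String} {sh : String} (e : List String) (h : sh ∈ ks) :
    posI (ks ++ e) sh = posI ks sh := by
  simp [posI, posN_append_of_mem e h]

-- the hard step: B's i2d update matches A's dict update, existing shingle
lemma i2d_mem {its : List (String × List Int)} {sh : String} (i : Int)
    (hnd : (ksOf its).Nodup) (hm : sh ∈ ksOf its) :
    (i2dOf its).modify (posI (ksOf its) sh) [] (fun ds => ds ++ [i]) = i2dOf (stepAI i its sh) := by
  have hklen : (ksOf its).length = its.length := by simp [ksOf]
  have hvlen : (vsOf its).length = its.length := by simp [vsOf]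
  set pk := posN (ksOf its) sh with hpkdef
  have hpk : pk < its.length := by
    rw [hpkdef]
    have := posN_lt hm
    omega
  have hppk : posI (ksOf its) sh = ((pk : Nat) : Int) := rfl
  have hvpk? : (vsOf its)[pk]? = some ((vsOf its)[pk]'(by omega)) :=
    List.getElem?_eq_getElem (by omega)
  have hget : (i2dOf its).getD (posI (ksOf its) sh) [] = (vsOf its)[pk]'(by omega) := by
    have h0 := find?_zip_int (vsOf its) 0 pk
    simp only [Nat.zero_add] at h0
    rw [hvlen, hvpk?] at h0
    show ((i2dOf its).get? (posI (ksOf its) sh)).getD [] = _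
    rw [show (i2dOf its).get? (posI (ksOf its) sh) =
        (List.find? (fun p => p.1 == ((pk : Nat) : Int)) ((rngF 0 its.length).zip (vsOf its))).map
          (fun p => p.2) from rfl]
    rw [h0]
    rfl
  have hcont : (i2dOf its).contains (posI (ksOf its) sh) = true := by
    have hzl : pk < ((rngF 0 its.length).zip (vsOf its)).length := by
      simp only [List.length_zip, length_rngF, hvlen, Nat.min_self]
      omega
    apply List.any_eq_true.mpr
    refine ⟨((rngF 0 its.length).zip (vsOf its))[pk]'hzl, List.getElem_mem hzl, ?_⟩
    rw [List.getElem_zip]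
    simp [rngF, hppk]
  apply PySem.Dict.ext
  show ((i2dOf its).insert (posI (ksOf its) sh)
      (((i2dOf its).getD (posI (ksOf its) sh) []) ++ [i])).items = (i2dOf (stepAI i its sh)).items
  rw [PySem.Dict.items_insert, if_pos hcont, hget]
  have hlen2 : (stepAI i its sh).length = its.length := len_stepAI_mem i hm
  show (((rngF 0 its.length).zip (vsOf its)).map
      (fun p => if p.1 == posI (ksOf its) sh
        then (posI (ksOf its) sh, (vsOf its)[pk]'(by omega) ++ [i]) else p)) =
    (rngF 0 (stepAI i its sh).length).zip (vsOf (stepAI i its sh))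
  rw [hlen2]
  have hvstep : vsOf (stepAI i its sh) =
      its.map (fun p => if p.1 == sh then ((vsOf its)[pk]?.getD []) ++ [i] else p.2) := by
    rw [stepAI_mem i hm]
    simp only [← hpkdef]
    unfold vsOf
    rw [List.map_map]
    apply List.map_congr_left
    intro p _
    by_cases h : p.1 = sh
    · simp [Function.comp, h]
    · have hb : (p.1 == sh) = false := by simpa using h
      simp [Function.comp, hb]
  rw [hvstep]
  apply List.ext_getElem
  · simp [List.length_zip, length_rngF, hvlen]
  · intro j hj1 hj2
    have hjn : j < its.length := by
      simp only [List.length_map, List.length_zip, length_rngF, hvlen, Nat.min_self] at hj1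
      omega
    rw [List.getElem_map, List.getElem_zip, List.getElem_zip, List.getElem_map]
    have hrj : ∀ (hb : j < (rngF 0 its.length).length), (rngF 0 its.length)[j]'hb = ((j : Nat) : Int) := by
      intro hb
      simp [rngF]
    rw [hrj]
    dsimp only
    by_cases hjpk : j = pk
    · have hbeq : (((j : Nat) : Int) == posI (ksOf its) sh) = true := by
        rw [hppk, hjpk]
        exact beq_self_eq_true _
      have h1 : (ksOf its)[pk]? = some sh := by
        rw [hpkdef]
        exact getElem?_posN hm
      have hkeypk : (its[pk]'(by omega)).1 = sh := by
        have h6 : (ksOf its)[pk]'(by omega) = sh := by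
          rw [List.getElem?_eq_getElem (by omega : pk < (ksOf its).length)] at h1
          exact Option.some_injective _ h1
        simpa [ksOf] using h6
      simp [hbeq, hvpk?, hppk, hjpk, hkeypk]
    · have hb2 : (((j : Nat) : Int) == posI (ksOf its) sh) = false := by
        rw [hppk]
        refine beq_eq_false_iff_ne.mpr ?_
        intro he
        exact hjpk (by exact_mod_cast he)
      have hkey : (its[j]'(by omega)).1 ≠ sh := by
        intro he
        have h2 : (ksOf its)[j]'(by omega) = sh := by simpa [ksOf] using he
        have h3 := posN_getElem hnd (by omega : j < (ksOf its).length) h2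
        rw [← hpkdef] at h3
        exact hjpk h3
      have hb1 : ((its[j]'(by omega)).1 == sh) = false := by simpa using hkey
      simp [hb1, hb2, vsOf]

lemma size_s2iOf (its : List (String × List Int)) :
    ((s2iOf its).size : Int) = ((its.length : Nat) : Int) := by
  simp [s2iOf, PySem.Dict.size, List.length_zip, length_rngF, ksOf]

lemma s2i_not {its : List (String × List Int)} {sh : String} (i : Int) (hm : sh ∉ ksOf its) :
    (s2iOf its).insert sh ((s2iOf its).size : Int) = s2iOf (stepAI i its sh) := by
  have hcont : (s2iOf its).contains sh = false := by
    apply List.any_eq_false.mpr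
    intro p hp
    have h1 : p.1 ∈ ksOf its := by
      have := List.map_fst_zip (l₁ := ksOf its) (l₂ := rngF 0 its.length)
        (by simp [length_rngF, ksOf])
      rw [← this]
      exact List.mem_map_of_mem hp
    intro he
    exact hm ((eq_of_beq he) ▸ h1)
  apply PySem.Dict.ext
  rw [PySem.Dict.items_insert, if_neg (by simp [hcont])]
  rw [size_s2iOf]
  show (ksOf its).zip (rngF 0 its.length) ++ _ =
    (ksOf (stepAI i its sh)).zip (rngF 0 (stepAI i its sh).length)
  rw [ks_stepAI_not_mem i hm, stepAI_not_mem i hm]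
  rw [show (its ++ [(sh, ([i] : List Int))]).length = its.length + 1 by simp]
  rw [rngF_snoc]
  rw [List.zip_append (by simp [ksOf, length_rngF])]
  simp

lemma i2s_not {its : List (String × List Int)} {sh : String} (i : Int) (hm : sh ∉ ksOf its) :
    (i2sOf its).insert ((s2iOf its).size : Int) sh = i2sOf (stepAI i its sh) := by
  have hcont : (i2sOf its).contains ((s2iOf its).size : Int) = false := by
    apply List.any_eq_false.mpr
    intro p hp
    have h1 : p.1 ∈ rngF 0 its.length := by
      have := List.map_fst_zip (l₁ := rngF 0 its.length) (l₂ := ksOf its)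
        (by simp [length_rngF, ksOf])
      rw [← this]
      exact List.mem_map_of_mem hp
    rw [mem_rngF] at h1
    rcases h1 with ⟨j, hj, hje⟩
    intro he
    have h2 : p.1 = ((its.length : Nat) : Int) := by
      rw [← size_s2iOf its]; exact eq_of_beq he
    rw [hje] at h2
    have h3 : (0 + j : Nat) = its.length := by exact_mod_cast h2
    omega
  apply PySem.Dict.ext
  rw [PySem.Dict.items_insert, if_neg (by simp [hcont])]
  rw [size_s2iOf]
  show (rngF 0 its.length).zip (ksOf its) ++ _ =
    (rngF 0 (stepAI i its sh).length).zip (ksOf (stepAI i its sh))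
  rw [ks_stepAI_not_mem i hm, stepAI_not_mem i hm]
  rw [show (its ++ [(sh, ([i] : List Int))]).length = its.length + 1 by simp]
  rw [rngF_snoc]
  rw [List.zip_append (by simp [ksOf, length_rngF])]
  simp

lemma i2d_not {its : List (String × List Int)} {sh : String} (i : Int) (hm : sh ∉ ksOf its) :
    ((i2dOf its).insert ((s2iOf its).size : Int) []).modify ((s2iOf its).size : Int) []
        (fun ds => ds ++ [i]) = i2dOf (stepAI i its sh) := by
  have hvlen : (vsOf its).length = its.length := by simp [vsOf]
  have hcont : (i2dOf its).contains ((s2iOf its).size : Int) = false := by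
    apply List.any_eq_false.mpr
    intro p hp
    have h1 : p.1 ∈ rngF 0 its.length := by
      have := List.map_fst_zip (l₁ := rngF 0 its.length) (l₂ := vsOf its)
        (by simp [length_rngF, hvlen])
      rw [← this]
      exact List.mem_map_of_mem hp
    rw [mem_rngF] at h1
    rcases h1 with ⟨j, hj, hje⟩
    intro he
    have h2 : p.1 = ((its.length : Nat) : Int) := by
      rw [← size_s2iOf its]; exact eq_of_beq he
    rw [hje] at h2
    have h3 : (0 + j : Nat) = its.length := by exact_mod_cast h2
    omega
  have hd1 : (i2dOf its).insert ((s2iOf its).size : Int) [] =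
      ⟨(rngF 0 its.length).zip (vsOf its) ++ [(((its.length : Nat) : Int), ([] : List Int))]⟩ := by
    apply PySem.Dict.ext
    rw [PySem.Dict.items_insert, if_neg (by simp [hcont]), size_s2iOf]
    rfl
  rw [hd1]
  have hfind0 : List.find? (fun p => p.1 == ((its.length : Nat) : Int))
      ((rngF 0 its.length).zip (vsOf its)) = none := by
    have h0 := find?_zip_int (vsOf its) 0 its.length
    simp only [Nat.zero_add] at h0
    rw [hvlen] at h0
    rw [h0]
    simp [hvlen]
  have hget : (PySem.Dict.mk ((rngF 0 its.length).zip (vsOf its) ++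
      [(((its.length : Nat) : Int), ([] : List Int))]) :
      PySem.Dict Int (List Int)).getD ((s2iOf its).size : Int) [] = ([] : List Int) := by
    rw [size_s2iOf]
    show ((List.find? (fun p => p.1 == ((its.length : Nat) : Int))
        ((rngF 0 its.length).zip (vsOf its) ++
          [(((its.length : Nat) : Int), ([] : List Int))])).map (fun p => p.2)).getD [] = _
    rw [find?_append_none hfind0]
    simp
  have hcont2 : (PySem.Dict.mk ((rngF 0 its.length).zip (vsOf its) ++
      [(((its.length : Nat) : Int), ([] : List Int))]) :
      PySem.Dict Int (List Int)).contains ((s2iOf its).size : Int) = true := by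
    rw [size_s2iOf]
    apply List.any_eq_true.mpr
    exact ⟨(((its.length : Nat) : Int), ([] : List Int)), by simp, by simp⟩
  simp only [PySem.Dict.modify]
  rw [hget]
  apply PySem.Dict.ext
  rw [PySem.Dict.items_insert, if_pos hcont2, size_s2iOf]
  show ((rngF 0 its.length).zip (vsOf its) ++
      [(((its.length : Nat) : Int), ([] : List Int))]).map _ =
    (rngF 0 (stepAI i its sh).length).zip (vsOf (stepAI i its sh))
  rw [stepAI_not_mem i hm]
  rw [show (its ++ [(sh, ([i] : List Int))]).length = its.length + 1 by simp]
  rw [rngF_snoc]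
  have hvs : vsOf (its ++ [(sh, ([i] : List Int))]) = vsOf its ++ [[i]] := by simp [vsOf]
  rw [hvs]
  rw [List.zip_append (by simp [length_rngF, hvlen])]
  rw [List.map_append]
  congr 1
  · conv_rhs => rw [← List.map_id ((rngF 0 its.length).zip (vsOf its))]
    apply List.map_congr_left
    intro p hp
    have h1 : p.1 ∈ rngF 0 its.length := by
      have := List.map_fst_zip (l₁ := rngF 0 its.length) (l₂ := vsOf its)
        (by simp [length_rngF, hvlen])
      rw [← this]
      exact List.mem_map_of_mem hp
    rw [mem_rngF] at h1
    rcases h1 with ⟨j, hj, hje⟩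
    have hb : (p.1 == ((its.length : Nat) : Int)) = false := by
      refine beq_eq_false_iff_ne.mpr ?_
      rw [hje]
      intro he
      have h3 : (0 + j : Nat) = its.length := by exact_mod_cast he
      omega
    simp [hb]
  · simp

-- one B step from a state mirroring its
lemma bStep_eq (i : Int) (its : List (String × List Int)) (acc : List Int) (sh : String)
    (hnd : (ksOf its).Nodup) :
    bStep i (acc, s2iOf its, i2sOf its, i2dOf its) sh =
      (acc ++ [posI (ksOf (stepAI i its sh)) sh],
       s2iOf (stepAI i its sh), i2sOf (stepAI i its sh), i2dOf (stepAI i its sh)) := by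
  by_cases hm : sh ∈ ksOf its
  · have hget : (s2iOf its).get? sh = some (posI (ksOf its) sh) := by
      rw [get?_s2iOf, if_pos hm]
    have hks := ks_stepAI_mem i hm
    have hlen := len_stepAI_mem i hm
    have hs2i : s2iOf (stepAI i its sh) = s2iOf its := by
      unfold s2iOf; rw [hks, hlen]
    have hi2s : i2sOf (stepAI i its sh) = i2sOf its := by
      unfold i2sOf; rw [hks, hlen]
    have hred : bStep i (acc, s2iOf its, i2sOf its, i2dOf its) sh =
        (acc ++ [posI (ksOf its) sh], s2iOf its, i2sOf its,
         (i2dOf its).modify (posI (ksOf its) sh) [] (fun ds => ds ++ [i])) := by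
      unfold bStep
      rw [hget]
    rw [hred, hs2i, hi2s, hks, i2d_mem i hnd hm]
  · have hget : (s2iOf its).get? sh = none := by
      rw [get?_s2iOf, if_neg hm]
    have hpos : posI (ksOf (stepAI i its sh)) sh = ((s2iOf its).size : Int) := by
      rw [ks_stepAI_not_mem i hm, size_s2iOf]
      unfold posI
      rw [posN_append_self hm]
      simp [ksOf]
    have hred : bStep i (acc, s2iOf its, i2sOf its, i2dOf its) sh =
        (acc ++ [((s2iOf its).size : Int)], (s2iOf its).insert sh ((s2iOf its).size : Int),
         (i2sOf its).insert ((s2iOf its).size : Int) sh,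
         ((i2dOf its).insert ((s2iOf its).size : Int) []).modify ((s2iOf its).size : Int) []
           (fun ds => ds ++ [i])) := by
      unfold bStep
      rw [hget]
    rw [hred, hpos, ← s2i_not i hm, ← i2s_not i hm, ← i2d_not i hm]

lemma innerB (i : Int) (shs : List String) : ∀ (its : List (String × List Int)) (acc : List Int),
    (ksOf its).Nodup →
    shs.foldl (bStep i) (acc, s2iOf its, i2sOf its, i2dOf its) =
      (acc ++ idxs i its shs, s2iOf (dacc i its shs), i2sOf (dacc i its shs),
       i2dOf (dacc i its shs)) := by
  induction shs with
  | nil => intro its acc h; simp [idxs, dacc]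
  | cons sh rest ih =>
      intro its acc h
      rw [List.foldl_cons, bStep_eq i its acc sh h]
      rw [ih (stepAI i its sh) (acc ++ [posI (ksOf (stepAI i its sh)) sh]) (nodup_stepAI i h)]
      have hd : dacc i its (sh :: rest) = dacc i (stepAI i its sh) rest := rfl
      rw [hd]
      simp [idxs, List.append_assoc]

-- A's inner dict loop is dacc
lemma enumFold (S : List String) : ∀ (s : Int) (d : PySem.Dict String (List Int)) (i : Int),
    (PySem.List.enumerate S s).foldl (fun d q => d.modify q.2 [] (fun ds => ds ++ [i])) d =
      S.foldl (fun d sh => d.modify sh [] (fun ds => ds ++ [i])) d := by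
  induction S with
  | nil => intro s d i; simp [PySem.List.enumerate_nil]
  | cons x t ih =>
      intro s d i
      rw [PySem.List.enumerate_cons, List.foldl_cons, List.foldl_cons]
      exact ih (s + 1) _ i

lemma dictFold (S : List String) : ∀ (its : List (String × List Int)) (i : Int),
    S.foldl (fun d sh => d.modify sh [] (fun ds => ds ++ [i])) (PySem.Dict.mk its) =
      ⟨dacc i its S⟩ := by
  induction S with
  | nil => intro its i; simp [dacc]
  | cons sh rest ih =>
      intro its i
      rw [List.foldl_cons, modify_mk, ih]
      rfl

lemma aShingles_eq (ty : String) (k : Int) (doc : String) :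
    aShingles ty k doc = bShingles ty k doc := by
  unfold aShingles bShingles
  rw [PySem.List.foldl_append_eq_flatMap]
  rfl

lemma aDoc_eq (ty : String) (k : Int) (ls : List (List String)) (its : List (String × List Int))
    (p : Int × String) :
    aDoc ty k (ls, ⟨its⟩) p =
      (ls ++ [bShingles ty k p.2], ⟨dacc p.1 its (bShingles ty k p.2)⟩) := by
  unfold aDoc
  rw [aShingles_eq]
  refine congrArg₂ Prod.mk rfl ?_
  show (PySem.List.enumerate (bShingles ty k p.2)).foldl
      (fun d q => d.modify q.2 [] (fun ds => ds ++ [p.1])) (⟨its⟩ : PySem.Dict String (List Int)) = _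
  rw [enumFold]
  exact dictFold (bShingles ty k p.2) its p.1

lemma outerA (ty : String) (k : Int) (l : List (Int × String)) :
    ∀ (ls : List (List String)) (its : List (String × List Int)),
    l.foldl (aDoc ty k) (ls, ⟨its⟩) =
      (ls ++ l.map (fun p => bShingles ty k p.2),
       ⟨dAll its (l.map (fun p => (p.1, bShingles ty k p.2)))⟩) := by
  induction l with
  | nil => intro ls its; simp [dAll]
  | cons p rest ih =>
      intro ls its
      rw [List.foldl_cons, aDoc_eq, ih]
      simp [dAll, List.append_assoc]

lemma bDoc_eq (ty : String) (k : Int) (ls : List (List Int)) (its : List (String × List Int))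
    (p : Int × String) (h : (ksOf its).Nodup) :
    bDoc ty k (ls, s2iOf its, i2sOf its, i2dOf its) p =
      (ls ++ [idxs p.1 its (bShingles ty k p.2)],
       s2iOf (dacc p.1 its (bShingles ty k p.2)),
       i2sOf (dacc p.1 its (bShingles ty k p.2)),
       i2dOf (dacc p.1 its (bShingles ty k p.2))) := by
  unfold bDoc
  dsimp only
  rw [innerB p.1 (bShingles ty k p.2) its [] h]
  simp

lemma outerB (ty : String) (k : Int) (l : List (Int × String)) :
    ∀ (ls : List (List Int)) (its : List (String × List Int)),
    (ksOf its).Nodup →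
    l.foldl (bDoc ty k) (ls, s2iOf its, i2sOf its, i2dOf its) =
      (ls ++ outs its (l.map (fun p => (p.1, bShingles ty k p.2))),
       s2iOf (dAll its (l.map (fun p => (p.1, bShingles ty k p.2)))),
       i2sOf (dAll its (l.map (fun p => (p.1, bShingles ty k p.2)))),
       i2dOf (dAll its (l.map (fun p => (p.1, bShingles ty k p.2))))) := by
  induction l with
  | nil => intro ls its h; simp [outs, dAll]
  | cons p rest ih =>
      intro ls its h
      rw [List.foldl_cons, bDoc_eq ty k ls its p h]
      rw [ih (ls ++ [idxs p.1 its (bShingles ty k p.2)])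
          (dacc p.1 its (bShingles ty k p.2)) (nodup_dacc _ _ _ h)]
      simp [outs, dAll, List.append_assoc]

lemma idxs_map (i : Int) (shs : List String) :
    ∀ (its : List (String × List Int)) (ext : List String),
    idxs i its shs = shs.map (fun sh => posI (ksOf (dacc i its shs) ++ ext) sh) := by
  induction shs with
  | nil => intro its ext; simp [idxs]
  | cons sh rest ih =>
      intro its ext
      have hd : dacc i its (sh :: rest) = dacc i (stepAI i its sh) rest := rfl
      rw [show idxs i its (sh :: rest) =
          posI (ksOf (stepAI i its sh)) sh :: idxs i (stepAI i its sh) rest from rfl]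
      rw [ih (stepAI i its sh) ext, hd, List.map_cons]
      congr 1
      rcases ks_dacc_ext rest (stepAI i its sh) i with ⟨e, he⟩
      rw [he, List.append_assoc]
      exact (posI_ext (e ++ ext) (mem_stepAI_self its sh i)).symm

lemma outs_map (l : List (Int × List String)) :
    ∀ (its : List (String × List Int)) (ext : List String),
    outs its l = l.map (fun p => p.2.map (fun sh => posI (ksOf (dAll its l) ++ ext) sh)) := by
  induction l with
  | nil => intro its ext; simp [outs]
  | cons p rest ih =>
      intro its ext
      have hd : dAll its (p :: rest) = dAll (dacc p.1 its p.2) rest := rfl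
      rw [show outs its (p :: rest) = idxs p.1 its p.2 :: outs (dacc p.1 its p.2) rest from rfl]
      rw [ih (dacc p.1 its p.2) ext, hd, List.map_cons]
      congr 1
      rcases ks_dAll_ext rest (dacc p.1 its p.2) with ⟨e, he⟩
      rw [he, List.append_assoc]
      exact idxs_map p.1 p.2 its (e ++ ext)

lemma pyRangeN (n : Nat) : PySem.List.pyRange 0 ((n : Nat) : Int) = rngF 0 n := by
  rw [PySem.List.pyRange_one]
  simp [rngF]

lemma ofList_zip (its : List (String × List Int)) (h : (ksOf its).Nodup) :
    PySem.Dict.ofList ((ksOf its).zip (rngF 0 its.length)) = s2iOf its := by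
  have hlen : (ksOf its).length ≤ (rngF 0 its.length).length := by
    simp [length_rngF, ksOf]
  have hfresh : ∀ a ∈ (ksOf its).zip (rngF 0 its.length),
      (PySem.Dict.empty : PySem.Dict String Int).contains a.1 = false := by
    intro a _; rfl
  have hnd : (((ksOf its).zip (rngF 0 its.length)).map (fun a => a.1)).Nodup := by
    rw [show (((ksOf its).zip (rngF 0 its.length)).map (fun a => a.1)) = ksOf its from
      List.map_fst_zip hlen]
    exact h
  apply PySem.Dict.ext
  show (((ksOf its).zip (rngF 0 its.length)).foldl (fun acc p => acc.insert p.1 p.2)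
      PySem.Dict.empty).items = _
  rw [PySem.Dict.items_foldl_insert_fresh _ _ _ _ hfresh hnd]
  simp [PySem.Dict.empty, s2iOf]

-- the whole equivalence, unconditionally on the ports
lemma ports_eq (docs : List String) (ty : String) (k w : Int) (m : String) :
    create_shingled_docs docs ty k w m = create_shingled_docs_alt docs ty k w m := by
  simp only [create_shingled_docs, create_shingled_docs_alt]
  rw [show (PySem.Dict.empty : PySem.Dict String (List Int)) = ⟨[]⟩ from rfl,
      show (PySem.Dict.empty : PySem.Dict String Int) = s2iOf [] from rfl,
      show (PySem.Dict.empty : PySem.Dict Int String) = i2sOf [] from rfl,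
      show (PySem.Dict.empty : PySem.Dict Int (List Int)) = i2dOf [] from rfl]
  rw [outerA ty k (PySem.List.enumerate docs) [] [],
      outerB ty k (PySem.List.enumerate docs) [] [] (by simp [ksOf])]
  dsimp only
  simp only [List.nil_append]
  set L := (PySem.List.enumerate docs).map (fun p => (p.1, bShingles ty k p.2)) with hL
  set ITS := dAll [] L with hITS
  have hnodup : (ksOf ITS).Nodup := nodup_dAll L [] (by simp [ksOf])
  have hklen : (ksOf ITS).length = ITS.length := by simp [ksOf]
  have hrng : PySem.List.pyRange 0 (((PySem.Dict.mk ITS).size : Nat) : Int) = rngF 0 ITS.length :=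
    pyRangeN ITS.length
  have hSD : PySem.Dict.ofList ((PySem.Dict.mk ITS).keys.zip
      (PySem.List.pyRange 0 (((PySem.Dict.mk ITS).size : Nat) : Int))) = s2iOf ITS := by
    rw [hrng]
    exact ofList_zip ITS hnodup
  refine congrArg₂ Prod.mk ?_ (congrArg₂ Prod.mk ?_ ?_)
  · -- docs_shingled
    rw [hSD]
    rw [outs_map L [] []]
    simp only [List.append_nil]
    rw [List.map_map, List.map_map]
    apply List.map_congr_left
    intro p hp
    show (bShingles ty k p.2).map (fun sh => ((s2iOf ITS).get? sh).getD 0) =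
      (bShingles ty k p.2).map (fun sh => posI (ksOf ITS) sh)
    apply List.map_congr_left
    intro sh hsh
    have hmem : sh ∈ ksOf ITS := by
      rw [hITS]
      exact mem_ks_dAll L [] (p.1, bShingles ty k p.2) (List.mem_map_of_mem hp) hsh
    rw [get?_s2iOf, if_pos hmem]
    rfl
  · -- all_shingles
    rw [hrng]
    rfl
  · -- all_shingles_docs_dict
    rw [hrng]
    rw [show (((rngF 0 ITS.length).zip ((PySem.Dict.mk ITS).keys)).map (fun q => q.1)) =
        rngF 0 ITS.length from List.map_fst_zip (by simp [length_rngF, ksOf, PySem.Dict.keys])]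
    rfl

-- ===== VERDICT (by name: the statement is the Claim_ definition above) =====
theorem create_shingled_docs_spec : Claim_equal_create_shingled_docs := by
  intro docs shingle_type shingle_size shingle_weight experiment_mode _ _
  exact ports_eq docs shingle_type shingle_size shingle_weight experiment_mode
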